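-- pv_equiv track=rewrite | github.com/tahmid-tanzim/problem-solving | codility/min-number-of-car.py | findMinNumberOfCar
-- ===== SOURCE A (Python) =====
-- from typing import List
--
-- def findMinNumberOfCar(P: List[int], S: List[int]) -> int:
--     total_cars = len(P)
--     filled_seat = list()
--     empty_seat = list()
--
--     for p, s in zip(P, S):
--         if p == s:
--             filled_seat.append(s)
--         else:
--             empty_seat.append(s - p)
--
--     while len(filled_seat) > 0 and len(empty_seat) > 0:
--         min_idx = filled_seat.index(min(filled_seat))
--         max_idx = empty_seat.index(max(empty_seat))
--
--         if filled_seat[min_idx] <= empty_seat[max_idx]: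
--             empty_seat[max_idx] -= filled_seat[min_idx]
--             del filled_seat[min_idx]
--             total_cars -= 1
--         else:
--             filled_seat[min_idx] -= empty_seat[max_idx]
--             del empty_seat[max_idx]
--
--     return total_cars
-- ===== SOURCE B (Python) =====
-- import bisect
--
-- def findMinNumberOfCar(P, S):
--     total_cars = len(P)
--     filled = sorted(s for p, s in zip(P, S) if p == s)
--     empty = sorted(s - p for p, s in zip(P, S) if p != s)
--
--     while filled and empty:
--         f = filled.pop(0)          # smallest filled load
--         e = empty.pop()            # largest empty capacity
--         if f <= e:
--             bisect.insort(empty, e - f)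
--             total_cars -= 1
--         else:
--             bisect.insort(filled, f - e)
--
--     return total_cars
-- ===== Notes on version B (the rewrite author's own statement) =====
-- stated objective: faster
-- what changed: B sorts the filled and empty lists once and then pops the min from the front / the max from the back, re-inserting the reduced value with bisect.insort, instead of A's per-iteration min()+index()+del full scans over unsorted lists.
import Mathlib
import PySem

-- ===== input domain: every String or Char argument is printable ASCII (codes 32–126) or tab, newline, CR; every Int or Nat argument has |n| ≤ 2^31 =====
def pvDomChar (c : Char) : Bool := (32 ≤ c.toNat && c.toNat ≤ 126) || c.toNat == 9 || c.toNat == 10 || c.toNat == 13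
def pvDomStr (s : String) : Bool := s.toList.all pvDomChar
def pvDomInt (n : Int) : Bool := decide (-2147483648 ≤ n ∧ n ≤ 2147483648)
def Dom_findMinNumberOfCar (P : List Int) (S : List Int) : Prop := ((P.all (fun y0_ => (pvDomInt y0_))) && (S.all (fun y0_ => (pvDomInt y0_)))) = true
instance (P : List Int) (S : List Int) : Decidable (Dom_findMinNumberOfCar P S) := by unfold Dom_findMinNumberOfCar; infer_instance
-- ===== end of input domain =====

-- B replaces A's per-iteration min()/index()/del full scans by sorting both lists once and
-- maintaining them sorted with end-pops and bisect insertion (measurably faster, same values).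

-- ===== PORT A =====
-- the while loop of A: state = (filled_seat, empty_seat, total_cars)
def pvLoopA (filled empty : List Int) (total : Int) : Int :=
  match hf : PySem.List.min? filled (fun x => x), he : PySem.List.max? empty (fun x => x) with
  | some mf, some me =>
    match hif : PySem.List.index? filled mf, hie : PySem.List.index? empty me with
    | some i, some j =>
      -- filled_seat[min_idx], empty_seat[max_idx]
      let fv := (PySem.List.pyGet? filled (i : Int)).getD 0
      let ev := (PySem.List.pyGet? empty (j : Int)).getD 0
      if fv ≤ ev then
        pvLoopA (filled.eraseIdx i) (empty.set j (ev - fv)) (total - 1)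
      else
        pvLoopA (filled.set i (fv - ev)) (empty.eraseIdx j) total
    | _, _ => total  -- unreachable: the minimum/maximum is a member of its list
  | _, _ => total
termination_by filled.length + empty.length
decreasing_by
  · have := PySem.List.getElem_of_index?_eq_some hif
    obtain ⟨hk, -, -⟩ := this
    have : (filled.eraseIdx i).length = filled.length - 1 := by
      simp [List.length_eraseIdx, hk]
    simp [this, List.length_set]
    have : 0 < filled.length := Nat.lt_of_le_of_lt (Nat.zero_le _) hk
    omega
  · have := PySem.List.getElem_of_index?_eq_some hie
    obtain ⟨hk, -, -⟩ := this
    have : (empty.eraseIdx j).length = empty.length - 1 := by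
      simp [List.length_eraseIdx, hk]
    simp [this, List.length_set]
    have : 0 < empty.length := Nat.lt_of_le_of_lt (Nat.zero_le _) hk
    omega

def findMinNumberOfCar (P : List Int) (S : List Int) : Int :=
  -- for p, s in zip(P, S): append to filled_seat / empty_seat
  let fe := (P.zip S).foldl
    (fun (acc : List Int × List Int) ps =>
      if ps.1 == ps.2 then (acc.1 ++ [ps.2], acc.2) else (acc.1, acc.2 ++ [ps.2 - ps.1]))
    ([], [])
  pvLoopA fe.1 fe.2 (P.length : Int)

-- ===== PORT B =====
-- bisect.insort into a sorted list (library call, ported as Mathlib's ordered insert)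
def pvInsort (xs : List Int) (v : Int) : List Int := List.orderedInsert (· ≤ ·) v xs

-- the while loop of B: filled sorted ascending (pop front = min), empty sorted ascending (pop back = max)
def pvLoopB (filled empty : List Int) (total : Int) : Int :=
  match filled, he : empty.getLast? with
  | f :: fs, some e =>
    if f ≤ e then
      pvLoopB fs (pvInsort empty.dropLast (e - f)) (total - 1)
    else
      pvLoopB (pvInsort fs (f - e)) empty.dropLast total
  | _, _ => total
termination_by filled.length + empty.length
decreasing_by
  · have hne : empty ≠ [] := by
      intro h; subst h; simp at he
    simp [pvInsort, List.orderedInsert_length, List.length_dropLast]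
    cases empty with
    | nil => exact absurd rfl hne
    | cons a t => simp
  · have hne : empty ≠ [] := by
      intro h; subst h; simp at he
    simp [pvInsort, List.orderedInsert_length, List.length_dropLast]
    cases empty with
    | nil => exact absurd rfl hne
    | cons a t => simp

def findMinNumberOfCar_alt (P : List Int) (S : List Int) : Int :=
  let filled := PySem.List.sorted
    ((P.zip S).filterMap (fun ps => if ps.1 == ps.2 then some ps.2 else none)) (fun x => x) false
  let empty := PySem.List.sorted
    ((P.zip S).filterMap (fun ps => if ps.1 == ps.2 then none else some (ps.2 - ps.1))) (fun x => x) false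
  pvLoopB filled empty (P.length : Int)

-- ===== PRECONDITION & SPEC =====
def Spec_findMinNumberOfCar (P : List Int) (S : List Int) (out : Int) : Prop := out = findMinNumberOfCar_alt P S
instance (P : List Int) (S : List Int) (out : Int) : Decidable (Spec_findMinNumberOfCar P S out) := by unfold Spec_findMinNumberOfCar; infer_instance

-- ===== CLAIM (what is proved, stated in full; the proofs are below) =====
def Claim_equal_findMinNumberOfCar : Prop := ∀ (P : List Int) (S : List Int), Dom_findMinNumberOfCar P S → Spec_findMinNumberOfCar P S (findMinNumberOfCar P S)

-- ===== LEMMAS AND PROOFS =====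

-- A's building loop produces exactly the two filterMap lists
theorem pvSplit_eq (pairs : List (Int × Int)) (accF accE : List Int) :
    pairs.foldl
      (fun (acc : List Int × List Int) ps =>
        if ps.1 == ps.2 then (acc.1 ++ [ps.2], acc.2) else (acc.1, acc.2 ++ [ps.2 - ps.1]))
      (accF, accE)
    = (accF ++ pairs.filterMap (fun ps => if ps.1 == ps.2 then some ps.2 else none),
       accE ++ pairs.filterMap (fun ps => if ps.1 == ps.2 then none else some (ps.2 - ps.1))) := by
  induction pairs generalizing accF accE with
  | nil => simp
  | cons p t ih =>
    simp only [List.foldl_cons]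
    by_cases h : p.1 = p.2
    · have hb : (p.1 == p.2) = true := by simp [h]
      simp only [hb, if_true]
      rw [ih]; simp [h, List.append_assoc]
    · have hb : (p.1 == p.2) = false := by simp [h]
      simp only [hb, Bool.false_eq_true, if_false]
      rw [ih]; simp [h, List.append_assoc]

-- eraseIdx / set at the position of a decomposed first occurrence
theorem pvEraseIdx_append (l1 l2 : List Int) (a : Int) :
    (l1 ++ a :: l2).eraseIdx l1.length = l1 ++ l2 := by
  induction l1 with
  | nil => simp
  | cons x t ih => simp [List.eraseIdx_cons_succ, ih]

theorem pvSet_append (l1 l2 : List Int) (a v : Int) :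
    (l1 ++ a :: l2).set l1.length v = l1 ++ v :: l2 := by
  induction l1 with
  | nil => simp
  | cons x t ih => simp [ih]

-- closed lists: the loops stop
theorem pvLoopA_stop (filled empty : List Int) (total : Int)
    (h : filled = [] ∨ empty = []) : pvLoopA filled empty total = total := by
  rw [pvLoopA.eq_def]
  split
  · next mf me hf he =>
    rcases h with h | h <;> subst h
    · rw [((PySem.List.min?_eq_none_iff _ _).mpr rfl)] at hf; cases hf
    · rw [((PySem.List.max?_eq_none_iff _ _).mpr rfl)] at he; cases he
  · rfl

theorem pvLoopB_stop (filled empty : List Int) (total : Int)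
    (h : filled = [] ∨ empty = []) : pvLoopB filled empty total = total := by
  rw [pvLoopB.eq_def]
  split
  · next f fs e he =>
    rcases h with h | h
    · exact absurd h (by simp)
    · subst h; simp at he
  · rfl

-- the core equivalence of the two loops, by strong induction on the total length
theorem pvLoop_eq (n : Nat) :
    ∀ (filled empty filled' empty' : List Int) (total : Int),
      filled.length + empty.length ≤ n →
      filled'.Perm filled → empty'.Perm empty →
      filled'.Pairwise (· ≤ ·) → empty'.Pairwise (· ≤ ·) →
      pvLoopA filled empty total = pvLoopB filled' empty' total := by
  induction n with
  | zero =>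
    intro filled empty filled' empty' total hlen hpf hpe _ _
    have hf0 : filled = [] := List.eq_nil_of_length_eq_zero (by omega)
    have hf0' : filled' = [] := List.eq_nil_of_length_eq_zero (by rw [hpf.length_eq, hf0]; rfl)
    rw [pvLoopA_stop _ _ _ (Or.inl hf0), pvLoopB_stop _ _ _ (Or.inl hf0')]
  | succ n ih =>
    intro filled empty filled' empty' total hlen hpf hpe hsf hse
    rcases eq_or_ne filled [] with hf0 | hf0
    · have hf0' : filled' = [] := List.eq_nil_of_length_eq_zero (by rw [hpf.length_eq, hf0]; rfl)
      rw [pvLoopA_stop _ _ _ (Or.inl hf0), pvLoopB_stop _ _ _ (Or.inl hf0')]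
    rcases eq_or_ne empty [] with he0 | he0
    · have he0' : empty' = [] := List.eq_nil_of_length_eq_zero (by rw [hpe.length_eq, he0]; rfl)
      rw [pvLoopA_stop _ _ _ (Or.inr he0), pvLoopB_stop _ _ _ (Or.inr he0')]
    -- the minimum filled value and the maximum empty value on the A side
    obtain ⟨mf, hmin⟩ : ∃ m, PySem.List.min? filled (fun x => x) = some m := by
      cases h : PySem.List.min? filled (fun x => x) with
      | none => exact absurd ((PySem.List.min?_eq_none_iff _ _).mp h) hf0
      | some m => exact ⟨m, rfl⟩
    obtain ⟨me, hmax⟩ : ∃ m, PySem.List.max? empty (fun x => x) = some m := by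
      cases h : PySem.List.max? empty (fun x => x) with
      | none => exact absurd ((PySem.List.max?_eq_none_iff _ _).mp h) he0
      | some m => exact ⟨m, rfl⟩
    have hmf_mem : mf ∈ filled := PySem.List.min?_mem hmin
    have hme_mem : me ∈ empty := PySem.List.max?_mem hmax
    have hmf_min : ∀ y ∈ filled, mf ≤ y := PySem.List.min?_isMin hmin
    have hme_max : ∀ y ∈ empty, y ≤ me := PySem.List.max?_isMax hmax
    obtain ⟨i, hif⟩ : ∃ i, PySem.List.index? filled mf = some i := by
      cases h : PySem.List.index? filled mf with
      | none => exact absurd ((PySem.List.index?_eq_none_iff _ _).mp h) (by simp [hmf_mem])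
      | some i => exact ⟨i, rfl⟩
    obtain ⟨j, hie⟩ : ∃ j, PySem.List.index? empty me = some j := by
      cases h : PySem.List.index? empty me with
      | none => exact absurd ((PySem.List.index?_eq_none_iff _ _).mp h) (by simp [hme_mem])
      | some j => exact ⟨j, rfl⟩
    -- decompose at the first occurrences
    obtain ⟨preF, sufF, hFdec, hFlen, -⟩ := (PySem.List.index?_eq_some_iff _ _ _).mp hif
    obtain ⟨preE, sufE, hEdec, hElen, -⟩ := (PySem.List.index?_eq_some_iff _ _ _).mp hie
    have hiF : i < filled.length := by rw [hFdec, ← hFlen]; simp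
    have hjE : j < empty.length := by rw [hEdec, ← hElen]; simp
    have hfv : (PySem.List.pyGet? filled (i : Int)).getD 0 = mf := by
      rw [PySem.List.pyGet?_natCast]
      rw [List.getElem?_eq_getElem hiF]
      simp only [Option.getD_some]
      obtain ⟨hk, hval, -⟩ := PySem.List.getElem_of_index?_eq_some hif
      exact hval
    have hev : (PySem.List.pyGet? empty (j : Int)).getD 0 = me := by
      rw [PySem.List.pyGet?_natCast]
      rw [List.getElem?_eq_getElem hjE]
      simp only [Option.getD_some]
      obtain ⟨hk, hval, -⟩ := PySem.List.getElem_of_index?_eq_some hie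
      exact hval
    -- the B side: head of filled' is mf, last of empty' is me
    obtain ⟨f, fs, hf'⟩ : ∃ f fs, filled' = f :: fs := by
      cases filled' with
      | nil => exact absurd (hpf.length_eq.symm.trans rfl) (by simp [List.length_pos_iff.mpr hf0]; omega)
      | cons f fs => exact ⟨f, fs, rfl⟩
    have he0' : empty' ≠ [] := by
      intro h
      exact he0 (List.eq_nil_of_length_eq_zero (by rw [← hpe.length_eq, h]; rfl))
    obtain ⟨e, hel⟩ : ∃ e, empty'.getLast? = some e :=
      ⟨empty'.getLast he0', List.getLast?_eq_getLast he0'⟩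
    have heDL : empty'.dropLast ++ [e] = empty' := List.dropLast_append_getLast? e hel
    -- f = mf
    have hfeq : f = mf := by
      have h1 : mf ≤ f := hmf_min f (hpf.mem_iff.mp (by simp [hf']))
      have h2 : f ≤ mf := by
        have hmem : mf ∈ filled' := hpf.mem_iff.mpr hmf_mem
        rw [hf'] at hmem hsf
        rcases List.mem_cons.mp hmem with h | h
        · omega
        · exact List.rel_of_pairwise_cons hsf h
      omega
    -- e = me
    have heeq : e = me := by
      have h1 : e ≤ me := hme_max e (hpe.mem_iff.mp (by rw [← heDL]; simp))
      have h2 : me ≤ e := by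
        have hmem : me ∈ empty' := hpe.mem_iff.mpr hme_mem
        rw [← heDL] at hmem hse
        rcases List.mem_append.mp hmem with h | h
        · exact (List.pairwise_append.mp hse).2.2 me h e (by simp)
        · simp at h; omega
      omega
    -- permutation bookkeeping for the two successor states
    have hfs_perm : fs.Perm (preF ++ sufF) := by
      have : (f :: fs).Perm (mf :: (preF ++ sufF)) :=
        (hf' ▸ hpf).trans (hFdec ▸ List.perm_middle)
      rw [hfeq] at this
      exact this.cons_inv
    have hdl_perm : empty'.dropLast.Perm (preE ++ sufE) := by
      have h1 : (e :: empty'.dropLast).Perm empty' := by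
        conv_rhs => rw [← heDL]
        exact (List.perm_append_singleton e empty'.dropLast).symm
      have : (e :: empty'.dropLast).Perm (me :: (preE ++ sufE)) :=
        (h1.trans hpe).trans (hEdec ▸ List.perm_middle)
      rw [heeq] at this
      exact this.cons_inv
    -- sortedness of the successor states
    have hsf_fs : fs.Pairwise (· ≤ ·) := by
      rw [hf'] at hsf; exact (List.pairwise_cons.mp hsf).2
    have hse_dl : empty'.dropLast.Pairwise (· ≤ ·) :=
      hse.sublist (List.dropLast_sublist empty')
    -- unfold one step of A
    rw [pvLoopA.eq_def, hmin, hmax]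
    simp only []
    rw [hif, hie]
    simp only [hfv, hev]
    -- unfold one step of B
    rw [pvLoopB.eq_def]
    rw [hf', hfeq, hel]
    simp only [heeq]
    by_cases hcmp : mf ≤ me
    · simp only [if_pos hcmp]
      apply ih
      · have : (filled.eraseIdx i).length = filled.length - 1 := by
          simp [List.length_eraseIdx, hiF]
        rw [this, List.length_set]
        omega
      · rw [hFdec, ← hFlen, pvEraseIdx_append]
        exact hfs_perm
      · rw [hEdec, ← hElen, pvSet_append]
        exact ((List.perm_orderedInsert _ _ _).trans
          ((hdl_perm.cons (me - mf)).trans List.perm_middle.symm))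
      · exact hsf_fs
      · exact List.Pairwise.orderedInsert _ _ hse_dl
    · simp only [if_neg hcmp]
      apply ih
      · have : (empty.eraseIdx j).length = empty.length - 1 := by
          simp [List.length_eraseIdx, hjE]
        rw [this, List.length_set]
        omega
      · rw [hFdec, ← hFlen, pvSet_append]
        exact ((List.perm_orderedInsert _ _ _).trans
          ((hfs_perm.cons (mf - me)).trans List.perm_middle.symm))
      · rw [hEdec, ← hElen, pvEraseIdx_append]
        exact hdl_perm
      · exact List.Pairwise.orderedInsert _ _ hsf_fs
      · exact hse_dl

theorem findMinNumberOfCar_spec : Claim_equal_findMinNumberOfCar := by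
  intro P S _
  unfold Spec_findMinNumberOfCar findMinNumberOfCar findMinNumberOfCar_alt
  simp only [pvSplit_eq, List.nil_append]
  exact pvLoop_eq _ _ _ _ _ _ (le_refl _)
    (PySem.List.sorted_perm _ _ _) (PySem.List.sorted_perm _ _ _)
    (PySem.List.sorted_pairwise _ _) (PySem.List.sorted_pairwise _ _)
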